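-- pv_equiv track=rewrite | github.com/Au-TNT/harmony-generator | generateChord.py | generateRepeatable
-- ===== SOURCE A (Python) =====
-- def generateRepeatable(chord:list, bass:int, avoidingInterval={6}, avoidingRepeatNote={3,4,8,9,10,11}, bassAvoid='same') -> list:
--     '''
--     avoidingRepeatNote is in scale
--     chord is after modified and placed in melody
--     '''
--
--     if bassAvoid == 'same':
--         bassAvoid = avoidingInterval
--     repeatable = set()
--     for repeatNote in chord:
--         valid = True
--         for note in chord: #reverse check
--             if note == bass:
--                 if (repeatNote - note + 12)%12 in bassAvoid:
--                     valid = False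
--             elif (repeatNote - note + 12)%12 in avoidingInterval:
--                 valid = False
--         if valid:
--             repeatable.add(repeatNote)
--     repeatable.difference_update(avoidingRepeatNote)
--     return repeatable
-- ===== SOURCE B (Python) =====
-- def generateRepeatable(chord:list, bass:int, avoidingInterval={6}, avoidingRepeatNote={3,4,8,9,10,11}, bassAvoid='same') -> list:
--     bassSet = avoidingInterval if bassAvoid == 'same' else bassAvoid
--     # Sieve: collect every blocked pitch-class residue once, ...
--     blocked = set()
--     for note in chord:
--         for d in (bassSet if note == bass else avoidingInterval):
--             if 0 <= d < 12:
--                 blocked.add((note + d) % 12)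
--     # ... then one filtering pass over the chord.
--     result = set()
--     for r in chord:
--         if r % 12 not in blocked:
--             result.add(r)
--     result.difference_update(avoidingRepeatNote)
--     return result
-- ===== Notes on version B (the rewrite author's own statement) =====
-- stated objective: alternative
-- what changed: Replaced the nested per-candidate scan (for each chord note, re-scan the whole chord against the interval sets) by a sieve: one pass builds the set of blocked pitch-class residues (note+d)%12 for the in-range interval offsets, then a single filtering pass keeps chord notes whose residue is unblocked.
import Mathlib
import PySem

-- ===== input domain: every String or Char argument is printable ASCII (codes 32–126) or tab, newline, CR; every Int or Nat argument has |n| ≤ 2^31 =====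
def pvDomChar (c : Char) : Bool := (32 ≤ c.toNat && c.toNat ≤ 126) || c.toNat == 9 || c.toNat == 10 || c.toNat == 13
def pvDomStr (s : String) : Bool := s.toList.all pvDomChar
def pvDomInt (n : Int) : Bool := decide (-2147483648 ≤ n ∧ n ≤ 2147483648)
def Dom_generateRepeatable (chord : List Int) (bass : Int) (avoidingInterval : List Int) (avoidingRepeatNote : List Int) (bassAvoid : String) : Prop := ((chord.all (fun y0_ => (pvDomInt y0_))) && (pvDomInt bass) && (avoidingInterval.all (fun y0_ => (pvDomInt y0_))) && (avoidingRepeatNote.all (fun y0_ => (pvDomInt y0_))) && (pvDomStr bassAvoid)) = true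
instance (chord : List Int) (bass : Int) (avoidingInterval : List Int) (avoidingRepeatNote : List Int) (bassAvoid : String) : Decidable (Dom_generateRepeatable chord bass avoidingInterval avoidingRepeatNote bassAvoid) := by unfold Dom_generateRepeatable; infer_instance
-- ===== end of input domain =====

-- B replaces A's nested chord×chord membership scan by a blocked-residue sieve plus one
-- filtering pass (alternative decomposition, same semantics on Pre_).

-- ===== PORT A =====
-- inner 'for note in chord' loop computing 'valid' for one candidate repeatNote r.
-- bset is the set Python binds to bassAvoid when bassAvoid == 'same'; Pre_ guarantees the
-- note == bass branch is only reached in that case (otherwise Python raises TypeError).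
def genRepValid (chord : List Int) (bass r : Int) (ai bset : List Int) : Bool :=
  chord.foldl (fun valid note =>
    if note == bass then
      (if PySem.Set.contains bset (PySem.Int.mod (r - note + 12) 12) then false else valid)
    else
      (if PySem.Set.contains ai (PySem.Int.mod (r - note + 12) 12) then false else valid)) true

def generateRepeatable (chord : List Int) (bass : Int) (avoidingInterval : List Int) (avoidingRepeatNote : List Int) (bassAvoid : String) : List Int :=
  let bset : List Int := if bassAvoid == "same" then avoidingInterval else []
  let repeatable : PySem.Set Int :=
    chord.foldl (fun s r => if genRepValid chord bass r avoidingInterval bset then PySem.Set.add s r else s) PySem.Set.empty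
  PySem.Set.diff repeatable avoidingRepeatNote

-- ===== PORT B =====
def generateRepeatable_alt (chord : List Int) (bass : Int) (avoidingInterval : List Int) (avoidingRepeatNote : List Int) (bassAvoid : String) : List Int :=
  let bassSet : List Int := if bassAvoid == "same" then avoidingInterval else []
  let blocked : PySem.Set Int :=
    chord.foldl (fun acc note =>
      (if note == bass then bassSet else avoidingInterval).foldl (fun acc2 d =>
        if 0 ≤ d ∧ d < 12 then PySem.Set.add acc2 (PySem.Int.mod (note + d) 12) else acc2) acc)
      PySem.Set.empty
  let result : PySem.Set Int :=
    chord.foldl (fun s r => if PySem.Set.contains blocked (PySem.Int.mod r 12) then s else PySem.Set.add s r) PySem.Set.empty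
  PySem.Set.diff result avoidingRepeatNote

-- ===== PRECONDITION & SPEC =====
-- Pre_ excludes exactly the inputs where Python's A raises TypeError: bassAvoid ≠ 'same'
-- leaves bassAvoid a string, and the 'in bassAvoid' test on a bass note raises (B raises there too).
def Pre_generateRepeatable (chord : List Int) (bass : Int) (avoidingInterval : List Int) (avoidingRepeatNote : List Int) (bassAvoid : String) : Prop :=
  bassAvoid = "same" ∨ bass ∉ chord
instance (chord : List Int) (bass : Int) (avoidingInterval : List Int) (avoidingRepeatNote : List Int) (bassAvoid : String) : Decidable (Pre_generateRepeatable chord bass avoidingInterval avoidingRepeatNote bassAvoid) := by unfold Pre_generateRepeatable; infer_instance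

def pvWitness_generateRepeatable : List Int × Int × List Int × List Int × String := ([0, 4, 7], 0, [6], [3, 4, 8, 9, 10, 11], "same")

def Spec_generateRepeatable (chord : List Int) (bass : Int) (avoidingInterval : List Int) (avoidingRepeatNote : List Int) (bassAvoid : String) (out : List Int) : Prop := out = generateRepeatable_alt chord bass avoidingInterval avoidingRepeatNote bassAvoid
instance (chord : List Int) (bass : Int) (avoidingInterval : List Int) (avoidingRepeatNote : List Int) (bassAvoid : String) (out : List Int) : Decidable (Spec_generateRepeatable chord bass avoidingInterval avoidingRepeatNote bassAvoid out) := by unfold Spec_generateRepeatable; infer_instance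

-- ===== CLAIM (what is proved, stated in full; the proofs are below) =====
def Claim_equal_generateRepeatable : Prop := ∀ (chord : List Int) (bass : Int) (avoidingInterval : List Int) (avoidingRepeatNote : List Int) (bassAvoid : String), Dom_generateRepeatable chord bass avoidingInterval avoidingRepeatNote bassAvoid → Pre_generateRepeatable chord bass avoidingInterval avoidingRepeatNote bassAvoid → Spec_generateRepeatable chord bass avoidingInterval avoidingRepeatNote bassAvoid (generateRepeatable chord bass avoidingInterval avoidingRepeatNote bassAvoid)

-- ===== LEMMAS AND PROOFS =====

theorem pymod_twelve (x : Int) : PySem.Int.mod x 12 = x % 12 :=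
  PySem.Int.mod_eq_emod_of_pos (by norm_num)

theorem mod_shift (r note d : Int) (h0 : 0 ≤ d) (h1 : d < 12) :
    (r - note + 12) % 12 = d ↔ r % 12 = (note + d) % 12 := by omega

-- membership in the inner sieve fold over one interval list
theorem mem_sieve_inner (note : Int) (iv : List Int) (acc : PySem.Set Int) (x : Int) :
    x ∈ iv.foldl (fun acc2 d => if 0 ≤ d ∧ d < 12 then PySem.Set.add acc2 (PySem.Int.mod (note + d) 12) else acc2) acc ↔
      x ∈ acc ∨ ∃ d ∈ iv, 0 ≤ d ∧ d < 12 ∧ x = (note + d) % 12 := by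
  induction iv generalizing acc with
  | nil => simp
  | cons d rest ih =>
    simp only [List.foldl_cons, ih]
    split_ifs with hd
    · simp only [PySem.Set.mem_add, pymod_twelve, List.mem_cons]
      constructor
      · rintro (⟨h | h⟩ | h)
        · exact Or.inl h
        · exact Or.inr ⟨d, Or.inl rfl, hd.1, hd.2, h⟩
        · obtain ⟨e, he, h⟩ := h; exact Or.inr ⟨e, Or.inr he, h⟩
      · rintro (h | ⟨e, he | he, h⟩)
        · exact Or.inl (Or.inl h)
        · subst he; exact Or.inl (Or.inr h.2.2)
        · exact Or.inr ⟨e, he, h⟩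
    · simp only [List.mem_cons]
      constructor
      · rintro (h | ⟨e, he, h⟩)
        · exact Or.inl h
        · exact Or.inr ⟨e, Or.inr he, h⟩
      · rintro (h | ⟨e, he | he, h⟩)
        · exact Or.inl h
        · subst he; exact absurd ⟨h.1, h.2.1⟩ hd
        · exact Or.inr ⟨e, he, h⟩

-- membership in B's fully built blocked set
theorem mem_blocked (chord : List Int) (bass : Int) (ai bset : List Int) (x : Int) :
    x ∈ chord.foldl (fun acc note =>
        (if note == bass then bset else ai).foldl (fun acc2 d =>
          if 0 ≤ d ∧ d < 12 then PySem.Set.add acc2 (PySem.Int.mod (note + d) 12) else acc2) acc)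
        PySem.Set.empty ↔
      ∃ note ∈ chord, ∃ d ∈ (if note == bass then bset else ai), 0 ≤ d ∧ d < 12 ∧ x = (note + d) % 12 := by
  suffices h : ∀ acc : PySem.Set Int,
      x ∈ chord.foldl (fun acc note =>
        (if note == bass then bset else ai).foldl (fun acc2 d =>
          if 0 ≤ d ∧ d < 12 then PySem.Set.add acc2 (PySem.Int.mod (note + d) 12) else acc2) acc) acc ↔
      x ∈ acc ∨ ∃ note ∈ chord, ∃ d ∈ (if note == bass then bset else ai), 0 ≤ d ∧ d < 12 ∧ x = (note + d) % 12 by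
    rw [h PySem.Set.empty]; simp [PySem.Set.empty]
  induction chord with
  | nil => simp
  | cons n rest ih =>
    intro acc
    simp only [List.foldl_cons, ih, mem_sieve_inner, List.mem_cons]
    constructor
    · rintro ((h | ⟨d, hd, h⟩) | ⟨m, hm, hrest⟩)
      · exact Or.inl h
      · exact Or.inr ⟨n, Or.inl rfl, d, hd, h⟩
      · exact Or.inr ⟨m, Or.inr hm, hrest⟩
    · rintro (h | ⟨m, hm | hm, hrest⟩)
      · exact Or.inl (Or.inl h)
      · subst hm; exact Or.inl (Or.inr hrest)
      · exact Or.inr ⟨m, hm, hrest⟩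

-- A's latch loop computes 'no chord note blocks r'
theorem genRepValid_eq_all (chord : List Int) (bass r : Int) (ai bset : List Int) :
    genRepValid chord bass r ai bset =
      chord.all (fun note => !(PySem.Set.contains (if note == bass then bset else ai) (PySem.Int.mod (r - note + 12) 12))) := by
  unfold genRepValid
  suffices h : ∀ (l : List Int) (b : Bool),
      l.foldl (fun valid note =>
        if note == bass then
          (if PySem.Set.contains bset (PySem.Int.mod (r - note + 12) 12) then false else valid)
        else
          (if PySem.Set.contains ai (PySem.Int.mod (r - note + 12) 12) then false else valid)) b
      = (b && l.all (fun note => !(PySem.Set.contains (if note == bass then bset else ai) (PySem.Int.mod (r - note + 12) 12)))) by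
    rw [h chord true]; simp
  intro l
  induction l with
  | nil => simp
  | cons n rest ih =>
    intro b
    simp only [List.foldl_cons, List.all_cons, ih]
    by_cases hn : n == bass <;>
      simp [hn, Bool.and_comm, Bool.and_assoc]

-- A keeps r iff r's residue is not in B's blocked set
theorem valid_iff_not_blocked (chord : List Int) (bass r : Int) (ai bset : List Int) :
    genRepValid chord bass r ai bset = true ↔
      PySem.Int.mod r 12 ∉ chord.foldl (fun acc note =>
        (if note == bass then bset else ai).foldl (fun acc2 d =>
          if 0 ≤ d ∧ d < 12 then PySem.Set.add acc2 (PySem.Int.mod (note + d) 12) else acc2) acc)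
        PySem.Set.empty := by
  rw [genRepValid_eq_all, List.all_eq_true, mem_blocked]
  simp only [Bool.not_eq_eq_eq_not, Bool.not_true, PySem.Set.contains_eq_listContains,
    List.contains_eq_mem, decide_eq_false_iff_not, pymod_twelve]
  constructor
  · rintro h ⟨note, hnote, d, hd, h0, h1, hx⟩
    exact h note hnote (by rw [(mod_shift r note d h0 h1).mpr hx]; exact hd)
  · intro h note hnote hmem
    have h0 : (0:Int) ≤ (r - note + 12) % 12 := by omega
    have h1 : (r - note + 12) % 12 < 12 := by omega
    exact h ⟨note, hnote, (r - note + 12) % 12, hmem, h0, h1, (mod_shift r note _ h0 h1).mp rfl⟩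

-- ===== VERDICT (by name: the statement is the Claim_ definition above) =====
theorem generateRepeatable_spec : Claim_equal_generateRepeatable := by
  intro chord bass ai arn bassAvoid _dom _pre
  unfold Spec_generateRepeatable generateRepeatable generateRepeatable_alt
  show PySem.Set.diff
      (List.foldl (fun s r => if genRepValid chord bass r ai (if bassAvoid == "same" then ai else []) then PySem.Set.add s r else s) PySem.Set.empty chord) arn
    = PySem.Set.diff
      (List.foldl (fun s r => if PySem.Set.contains
          (List.foldl (fun acc note => List.foldl (fun acc2 d => if 0 ≤ d ∧ d < 12 then PySem.Set.add acc2 (PySem.Int.mod (note + d) 12) else acc2) acc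
            (if note == bass then (if bassAvoid == "same" then ai else []) else ai)) PySem.Set.empty chord)
          (PySem.Int.mod r 12) then s else PySem.Set.add s r) PySem.Set.empty chord) arn
  congr 1
  apply PySem.List.foldl_congr_mem
  intro acc r _hr
  by_cases hv : genRepValid chord bass r ai (if bassAvoid == "same" then ai else []) = true
  · have hnb := (valid_iff_not_blocked chord bass r ai (if bassAvoid == "same" then ai else [])).mp hv
    rw [if_pos hv, if_neg]
    intro hc
    exact hnb ((PySem.Set.contains_iff _ _).mp hc)
  · have hb : PySem.Int.mod r 12 ∈ List.foldl (fun acc note => List.foldl (fun acc2 d => if 0 ≤ d ∧ d < 12 then PySem.Set.add acc2 (PySem.Int.mod (note + d) 12) else acc2) acc (if note == bass then (if bassAvoid == "same" then ai else []) else ai)) PySem.Set.empty chord := by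
      by_contra hnb
      exact hv ((valid_iff_not_blocked chord bass r ai (if bassAvoid == "same" then ai else [])).mpr hnb)
    rw [if_neg hv, if_pos ((PySem.Set.contains_iff _ _).mpr hb)]
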